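-- pv_equiv track=rewrite | github.com/jcthom85/Brave | brave_game/commands/brave.py | _stack_blocks
-- ===== SOURCE A (Python) =====
-- def _stack_blocks(blocks):
--     """Join preformatted blocks with one blank line between them."""
--
--     lines = []
--     for block in blocks:
--         if not block:
--             continue
--         if lines:
--             lines.append("")
--         lines.extend(block)
--     return lines
-- ===== SOURCE B (Python) =====
-- def _stack_blocks(blocks):
--     """Join preformatted blocks with one blank line between them."""
--     if not blocks:
--         return []
--     head = blocks[0]
--     rest = _stack_blocks(blocks[1:])
--     if not head:
--         return rest
--     if not rest:
--         return list(head)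
--     return list(head) + [""] + rest
-- ===== Notes on version B (the rewrite author's own statement) =====
-- stated objective: alternative
-- what changed: Replaces A's iterative left-to-right loop with stateful separator bookkeeping ('if lines:') by a structural recursion on the list that builds the result back-to-front: stack the tail first, then attach the head with a separator only if both sides are non-empty.
import Mathlib
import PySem

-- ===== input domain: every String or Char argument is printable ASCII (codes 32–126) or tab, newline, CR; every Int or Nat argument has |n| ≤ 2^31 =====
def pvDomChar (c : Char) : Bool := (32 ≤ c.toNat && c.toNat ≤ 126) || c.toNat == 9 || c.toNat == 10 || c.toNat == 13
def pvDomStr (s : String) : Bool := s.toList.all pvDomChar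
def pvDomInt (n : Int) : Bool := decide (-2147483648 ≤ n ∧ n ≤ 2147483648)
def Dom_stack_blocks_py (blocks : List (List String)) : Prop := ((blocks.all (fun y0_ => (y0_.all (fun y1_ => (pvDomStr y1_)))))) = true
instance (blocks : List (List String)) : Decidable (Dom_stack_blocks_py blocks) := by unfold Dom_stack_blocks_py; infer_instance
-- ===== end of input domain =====

-- B replaces A's stateful iterative loop by a structural recursion that stacks the tail
-- first and attaches the head with a separator only when both sides are non-empty
-- (objective: alternative decomposition, same values).

-- ===== PORT A =====
def stack_blocks_py (blocks : List (List String)) : List String :=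
  blocks.foldl (fun lines block =>
    if block.isEmpty then lines
    else (if lines.isEmpty then lines else lines ++ [""]) ++ block) []

-- ===== PORT B =====
def stack_blocks_py_alt : List (List String) → List String
  | [] => []
  | head :: tail =>
      let rest := stack_blocks_py_alt tail
      if head.isEmpty then rest
      else if rest.isEmpty then head
      else head ++ "" :: rest

-- ===== PRECONDITION & SPEC =====
def Spec_stack_blocks_py (blocks : List (List String)) (out : List String) : Prop := out = stack_blocks_py_alt blocks
instance (blocks : List (List String)) (out : List String) : Decidable (Spec_stack_blocks_py blocks out) := by unfold Spec_stack_blocks_py; infer_instance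

-- ===== CLAIM (what is proved, stated in full; the proofs are below) =====
def Claim_equal_stack_blocks_py : Prop := ∀ (blocks : List (List String)), Dom_stack_blocks_py blocks → Spec_stack_blocks_py blocks (stack_blocks_py blocks)

-- ===== LEMMAS AND PROOFS =====

-- A's fold from an arbitrary accumulator, characterised by B's recursion.
theorem sb_foldl_char (bs : List (List String)) :
    ∀ (acc : List String),
      bs.foldl (fun lines block =>
        if block.isEmpty then lines
        else (if lines.isEmpty then lines else lines ++ [""]) ++ block) acc
      = if (stack_blocks_py_alt bs).isEmpty then acc
        else if acc.isEmpty then stack_blocks_py_alt bs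
        else acc ++ "" :: stack_blocks_py_alt bs := by
  induction bs with
  | nil => intro acc; simp [stack_blocks_py_alt]
  | cons b bs ih =>
    intro acc
    cases hb : b.isEmpty with
    | true =>
      simp only [List.foldl_cons, if_pos hb, stack_blocks_py_alt, ih]
    | false =>
      have hbne : b ≠ [] := by simpa [List.isEmpty_iff] using hb
      simp only [List.foldl_cons, hb, if_false, Bool.false_eq_true, stack_blocks_py_alt]
      rw [ih]
      cases hr : (stack_blocks_py_alt bs).isEmpty with
      | true =>
        have : stack_blocks_py_alt bs = [] := by simpa [List.isEmpty_iff] using hr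
        cases hacc : acc.isEmpty with
        | true =>
          have : acc = [] := by simpa [List.isEmpty_iff] using hacc
          simp [this, hb]
        | false =>
          have haccne : acc ≠ [] := by simpa [List.isEmpty_iff] using hacc
          simp [hb]
      | false =>
        have hrne : stack_blocks_py_alt bs ≠ [] := by simpa [List.isEmpty_iff] using hr
        cases hacc : acc.isEmpty with
        | true =>
          have : acc = [] := by simpa [List.isEmpty_iff] using hacc
          simp [this, hb, hbne]
        | false =>
          have haccne : acc ≠ [] := by simpa [List.isEmpty_iff] using hacc
          simp [hbne, haccne]

-- ===== VERDICT (by name: the statement is the Claim_ definition above) =====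
theorem stack_blocks_py_spec : Claim_equal_stack_blocks_py := by
  intro blocks _
  unfold Spec_stack_blocks_py stack_blocks_py
  rw [sb_foldl_char]
  cases hr : (stack_blocks_py_alt blocks).isEmpty with
  | true =>
    have h : stack_blocks_py_alt blocks = [] := by simpa [List.isEmpty_iff] using hr
    simp [h]
  | false => simp
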